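-- pv_equiv track=rewrite | github.com/nickellen/Algoritmos | lista 9/MES-Alg-09-Ex-11.py | texto_palavras
-- ===== SOURCE A (Python) =====
-- def texto_palavras(texto):
--     lista = []
--     palavra =''
--     for caractere in texto:
--         if caractere in ["!",".","?",",", " ","-","/"]:
--             if palavra!="":
--                 lista.append(palavra)
--                 palavra = ''
--         else:
--             palavra+= caractere
--     if palavra!='':
--         lista.append(palavra)
--     return ' '.join(lista)
-- ===== SOURCE B (Python) =====
-- def texto_palavras(texto):
--     delims = set("!.?, -/")
--     words = []
--     i = 0
--     n = len(texto)
--     while i < n: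
--         if texto[i] in delims:
--             i += 1
--         else:
--             j = i + 1
--             while j < n and texto[j] not in delims:
--                 j += 1
--             words.append(texto[i:j])
--             i = j
--     return ' '.join(words)
-- ===== Notes on version B (the rewrite author's own statement) =====
-- stated objective: alternative
-- what changed: Replaces A's per-character word-buffer accumulation (append char by char, flush on delimiter) with a two-pointer scan that skips delimiters and slices each maximal delimiter-free run out directly, avoiding per-character string concatenation.
import Mathlib
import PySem

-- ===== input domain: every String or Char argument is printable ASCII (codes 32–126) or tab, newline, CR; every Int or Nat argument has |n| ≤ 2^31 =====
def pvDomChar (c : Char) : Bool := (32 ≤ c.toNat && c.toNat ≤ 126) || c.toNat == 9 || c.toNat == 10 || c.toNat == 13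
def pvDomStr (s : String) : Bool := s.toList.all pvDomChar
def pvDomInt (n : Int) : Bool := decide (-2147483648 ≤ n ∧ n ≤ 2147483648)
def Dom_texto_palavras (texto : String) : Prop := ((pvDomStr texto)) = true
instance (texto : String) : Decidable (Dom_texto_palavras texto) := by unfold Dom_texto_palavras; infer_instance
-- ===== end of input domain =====

-- B replaces A's per-character word-buffer scan by a two-pointer scan that skips
-- delimiters and slices out each maximal delimiter-free run (alternative, same cost).


-- ===== PORT A =====
-- the literal list ["!",".","?",",", " ","-","/"] of one-char strings, as chars
def pvDelimsA : List Char := ['!', '.', '?', ',', ' ', '-', '/']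

-- the body of A's for-loop: flush palavra on a delimiter, else extend it
def pvStepA (st : List (List Char) × List Char) (caractere : Char) :
    List (List Char) × List Char :=
  if caractere ∈ pvDelimsA then
    if st.2 ≠ [] then (st.1 ++ [st.2], []) else st
  else (st.1, st.2 ++ [caractere])

def texto_palavras (texto : String) : String :=
  -- lista = []; palavra = ''; for caractere in texto: …
  let r := texto.toList.foldl pvStepA ([], [])
  let lista := if r.2 ≠ [] then r.1 ++ [r.2] else r.1
  String.mk (PySem.Chars.join [' '] lista)

-- ===== PORT B =====
-- delims = set("!.?, -/")  (a set literal of those seven characters)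
def pvDelimsB : PySem.Set Char := PySem.Set.ofList ['!', '.', '?', ',', ' ', '-', '/']
def pvIsDelimB (c : Char) : Bool := decide (c ∈ pvDelimsB)

-- the two-pointer while-loop of Source B: skip a delimiter, else slice out texto[i:j],
-- the maximal delimiter-free run starting at i, and continue at j
def pvWordsB : List Char → List (List Char)
  | [] => []
  | c :: rest =>
    if pvIsDelimB c then pvWordsB rest
    else (c :: rest.takeWhile (fun x => !pvIsDelimB x)) ::
         pvWordsB (rest.dropWhile (fun x => !pvIsDelimB x))
termination_by cs => cs.length
decreasing_by
  · simp
  · exact Nat.lt_succ_of_le (List.length_dropWhile_le _ _)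

def texto_palavras_alt (texto : String) : String :=
  String.mk (PySem.Chars.join [' '] (pvWordsB texto.toList))

-- ===== PRECONDITION & SPEC =====
def Spec_texto_palavras (texto : String) (out : String) : Prop := out = texto_palavras_alt texto
instance (texto : String) (out : String) : Decidable (Spec_texto_palavras texto out) := by unfold Spec_texto_palavras; infer_instance

-- ===== CLAIM (what is proved, stated in full; the proofs are below) =====
def Claim_equal_texto_palavras : Prop := ∀ (texto : String), Dom_texto_palavras texto → Spec_texto_palavras texto (texto_palavras texto)

-- ===== LEMMAS AND PROOFS =====

-- the words A's loop still emits when started with pending buffer p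
def pvG : List Char → List Char → List (List Char)
  | [], p => if p = [] then [] else [p]
  | c :: cs, p =>
    if c ∈ pvDelimsA then (if p = [] then pvG cs [] else p :: pvG cs []) else pvG cs (p ++ [c])

theorem pvDelim_eq (c : Char) : (c ∈ pvDelimsA) ↔ pvIsDelimB c = true := by
  simp [pvIsDelimB, pvDelimsB, pvDelimsA, PySem.Set.mem_ofList]

theorem pvA_loop (cs : List Char) : ∀ l p,
    (if (cs.foldl pvStepA (l, p)).2 ≠ [] then
       (cs.foldl pvStepA (l, p)).1 ++ [(cs.foldl pvStepA (l, p)).2]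
     else (cs.foldl pvStepA (l, p)).1) = l ++ pvG cs p := by
  induction cs with
  | nil => intro l p; simp [pvG]; split_ifs <;> simp_all
  | cons c cs ih =>
    intro l p
    by_cases hc : c ∈ pvDelimsA <;> by_cases hp : p = [] <;>
      simp_all [List.foldl_cons, pvStepA, pvG]

-- joint characterisation of pvG by the words of B's scan
theorem pvG_eq (cs : List Char) :
    (∀ p, p ≠ [] →
      pvG cs p = (p ++ cs.takeWhile (fun x => !pvIsDelimB x)) ::
                 pvWordsB (cs.dropWhile (fun x => !pvIsDelimB x))) ∧
    pvG cs [] = pvWordsB cs := by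
  induction cs with
  | nil => exact ⟨fun p hp => by simp [pvG, hp, pvWordsB], by simp [pvG, pvWordsB]⟩
  | cons c cs ih =>
    by_cases hc : c ∈ pvDelimsA
    · have hb : pvIsDelimB c = true := (pvDelim_eq c).mp hc
      refine ⟨fun p hp => ?_, ?_⟩
      · simp [pvG, hc, hp, hb, pvWordsB, ih.2]
      · simp [pvG, hc, pvWordsB, hb, ih.2]
    · have hb : pvIsDelimB c = false := by
        rcases Bool.eq_false_or_eq_true (pvIsDelimB c) with h | h
        · exact absurd ((pvDelim_eq c).mpr h) hc
        · exact h
      refine ⟨fun p hp => ?_, ?_⟩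
      · simp only [pvG, if_neg hc]
        rw [ih.1 (p ++ [c]) (by simp)]
        simp [hb]
      · simp only [pvG, if_neg hc, List.nil_append]
        rw [ih.1 [c] (by simp)]
        simp [pvWordsB, hb]

-- ===== VERDICT (by name: the statement is the Claim_ definition above) =====
theorem texto_palavras_spec : Claim_equal_texto_palavras := by
  intro texto _
  show texto_palavras texto = texto_palavras_alt texto
  simp only [texto_palavras, texto_palavras_alt]
  rw [pvA_loop texto.toList [] [], (pvG_eq texto.toList).2]
  simp
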